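-- pv_equiv track=rewrite | github.com/sowf/codeforces | competitions/round875/1/main.py | solution
-- ===== SOURCE A (Python) =====
-- def solution(lst):
--     n = len(lst)
--
--     b = []
--     a = sorted(lst, reverse=True)
--     ab = list(lst)
--
--     for i in range(n-1, -1, -1):
--         if i == n - 1:
--             max_val = a.pop(0)
--             ab[i] += max_val
--             b.append(max_val)
--         else:
--             l = 0
--             while ab[i] + a[l] > ab[i+1]:
--                 l += 1
--
--             cur_val = a.pop(l)
--             ab[i] += cur_val
--             b.append(cur_val)
--
--     return b[::-1]
-- ===== SOURCE B (Python) =====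
-- from bisect import bisect_right
--
--
-- def solution(lst):
--     n = len(lst)
--     if n == 0:
--         return []
--     asc = sorted(lst)
--     v = asc.pop()                 # the largest value goes to the last position
--     t = lst[n - 1] + v            # running sum threshold (A's ab[i+1])
--     out = [v]
--     for i in range(n - 2, -1, -1):
--         # rightmost remaining value not exceeding t - lst[i], by binary search
--         j = bisect_right(asc, t - lst[i])
--         if j == 0:
--             raise IndexError("no feasible value remains")
--         v = asc.pop(j - 1)
--         t = lst[i] + v
--         out.append(v)
--     return out[::-1]
-- ===== Notes on version B (the rewrite author's own statement) =====
-- stated objective: faster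
-- what changed: B keeps A's greedy selection rule (take the largest remaining value that keeps the running sum bounded) but replaces A's descending sorted list + inner linear while-scan + mutated ab array by an ascending sorted list queried with bisect_right (binary search) and a single running threshold scalar, building the output directly.
import Mathlib
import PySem

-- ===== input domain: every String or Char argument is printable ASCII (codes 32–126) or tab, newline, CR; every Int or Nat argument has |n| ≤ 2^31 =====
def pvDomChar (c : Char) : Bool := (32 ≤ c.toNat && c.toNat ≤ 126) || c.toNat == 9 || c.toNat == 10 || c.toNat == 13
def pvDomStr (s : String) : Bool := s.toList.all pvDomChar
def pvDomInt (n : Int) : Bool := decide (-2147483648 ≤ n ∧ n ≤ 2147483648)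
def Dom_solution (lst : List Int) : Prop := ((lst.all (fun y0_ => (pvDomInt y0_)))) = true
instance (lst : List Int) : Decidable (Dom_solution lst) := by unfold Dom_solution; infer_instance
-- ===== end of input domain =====

-- B keeps A's greedy selection rule but replaces A's descending list + inner linear scan + ab
-- array by an ascending sorted list + binary search (bisect_right) + one running threshold.

-- ===== PORT A =====
-- the inner 'while ab[i] + a[l] > ab[i+1]: l += 1' : scans a from index l; none = IndexError
def findlA (abi ab1 : Int) : List Int → Nat → Option Nat
  | [], _ => none
  | v :: rest, l => if abi + v > ab1 then findlA abi ab1 rest (l + 1) else some l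

-- one iteration of the for-loop body at index i; none = an exception in Python
def stepA (n i : Nat) (a ab b : List Int) : Option (List Int × List Int × List Int) :=
  if i = n - 1 then
    match PySem.List.pop? a 0, PySem.List.pyGet? ab (i : Int) with
    | some (mv, a'), some abi => some (a', ab.set i (abi + mv), b ++ [mv])
    | _, _ => none
  else
    match PySem.List.pyGet? ab (i : Int), PySem.List.pyGet? ab ((i : Int) + 1) with
    | some abi, some ab1 =>
      match findlA abi ab1 a 0 with
      | none => none
      | some l =>
        match PySem.List.pop? a (l : Int) with
        | some (cv, a') => some (a', ab.set i (abi + cv), b ++ [cv])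
        | none => none
    | _, _ => none

-- 'for i in range(n-1, -1, -1)': indices i, i-1, …, 0
def goA (n : Nat) : Nat → List Int → List Int → List Int → Option (List Int)
  | 0, a, ab, b => (stepA n 0 a ab b).map (fun s => s.2.2)
  | i + 1, a, ab, b =>
    match stepA n (i + 1) a ab b with
    | none => none
    | some (a', ab', b') => goA n i a' ab' b'

def solution (lst : List Int) : List Int :=
  let n := lst.length
  let a := PySem.List.sorted lst (fun x => x) true
  if n = 0 then ([] : List Int).reverse   -- empty range: b = [], return b[::-1]
  else
    match goA n (n - 1) a lst [] with
    | some b => b.reverse                 -- b[::-1]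
    | none => []                          -- Python raises IndexError here; outside Pre_

-- ===== PORT B =====
-- 'j = bisect_right(asc, t - lst[i]); if j == 0: raise; v = asc.pop(j - 1)'; none = the raise
def stepB (lst : List Int) (i : Nat) (asc : List Int) (t : Int) : Option (Int × List Int) :=
  let j := PySem.List.bisectRight asc (t - lst.getD i 0)   -- lst[i]: i is always in range
  if j = 0 then none
  else PySem.List.pop? asc ((j : Int) - 1)

-- 'for i in range(n - 2, -1, -1)': appends to out, threads the running threshold t
def goB (lst : List Int) : Nat → List Int → Int → List Int → Option (List Int)
  | 0, asc, t, out =>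
    match stepB lst 0 asc t with
    | none => none
    | some (v, _) => some (out ++ [v])
  | i + 1, asc, t, out =>
    match stepB lst (i + 1) asc t with
    | none => none
    | some (v, asc') => goB lst i asc' (lst.getD (i + 1) 0 + v) (out ++ [v])

def solution_alt (lst : List Int) : List Int :=
  let n := lst.length
  if n = 0 then []
  else
    let asc := PySem.List.sorted lst (fun x => x) false
    match PySem.List.pop? asc (-1) with          -- 'v = asc.pop()'
    | none => []                                  -- unreachable: n ≠ 0
    | some (v, asc') =>
      let t := lst.getD (n - 1) 0 + v
      if n = 1 then [v]                           -- loop body never runs; out[::-1] = [v]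
      else
        match goB lst (n - 2) asc' t [v] with
        | some out => out.reverse                 -- out[::-1]
        | none => []                              -- Python raises IndexError here; outside Pre_

-- ===== PRECONDITION & SPEC =====
-- A raises IndexError exactly when, at some step, no remaining value v keeps the running sum
-- bounded (ab[i] + v ≤ ab[i+1]); Pre_ states that this greedy selection never runs out — it is
-- the exact domain of A: every input on which A returns is admitted, only the crashes are excluded.
-- feasCheck processes the positions right to left (xs = reversed prefix still to do), each time
-- taking the largest remaining value that fits under the threshold t.
def feasCheck : Int → List Int → List Int → Bool
  | _, [], _ => true
  | t, x :: xs, rem =>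
    match (rem.filter (fun v => decide (v ≤ t - x))).max? with
    | none => false
    | some v => feasCheck (x + v) xs (rem.erase v)

def preCheck (lst : List Int) : Bool :=
  match lst.getLast?, lst.max? with
  | some x, some m => feasCheck (x + m) lst.dropLast.reverse (lst.erase m)
  | _, _ => true

def Pre_solution (lst : List Int) : Prop := preCheck lst = true
instance (lst : List Int) : Decidable (Pre_solution lst) := by unfold Pre_solution; infer_instance
def pvWitness_solution : List Int := [-1, 1, 2, -1, 3]
def Spec_solution (lst : List Int) (out : List Int) : Prop := out = solution_alt lst
instance (lst : List Int) (out : List Int) : Decidable (Spec_solution lst out) := by unfold Spec_solution; infer_instance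

-- ===== CLAIM (what is proved, stated in full; the proofs are below) =====
def Claim_equal_solution : Prop := ∀ (lst : List Int), Dom_solution lst → Pre_solution lst → Spec_solution lst (solution lst)

-- ===== LEMMAS AND PROOFS =====
-- (The ports in fact agree on every input: where both Pythons raise, both ports return [].
--  Pre_ matters for the behavioural comparison with the real Pythons, not for this proof.)

-- sorted(lst, reverse=True) is the reverse of sorted(lst): on Int values the stable orders agree
lemma sortedDesc_eq_reverse_asc (lst : List Int) :
    PySem.List.sorted lst (fun x => x) true = (PySem.List.sorted lst (fun x => x) false).reverse := by
  refine List.Perm.eq_of_pairwise (le := fun a b : Int => b ≤ a)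
    (fun a b _ _ h1 h2 => le_antisymm h2 h1)
    (PySem.List.sorted_pairwise_rev lst (fun x => x))
    ((List.pairwise_reverse).mpr (by simpa using PySem.List.sorted_pairwise lst (fun x => x)))
    ((PySem.List.sorted_perm lst (fun x => x) true).trans
      ((PySem.List.sorted_perm lst (fun x => x) false).symm.trans
        (List.reverse_perm _).symm))

-- the while-loop stops at the first index whose element fits
lemma findlA_some (x t : Int) :
    ∀ (ys : List Int) (p k : Nat) (hp : p < ys.length),
      (∀ q (hq : q < ys.length), q < p → x + ys[q] > t) → x + ys[p] ≤ t →
      findlA x t ys k = some (k + p) := by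
  intro ys
  induction ys with
  | nil => intro p k hp; simp at hp
  | cons v rest ih =>
    intro p k hp hbefore hat
    match p with
    | 0 =>
      simp only [List.getElem_cons_zero] at hat
      simp [findlA, show ¬ (x + v > t) by omega]
    | p' + 1 =>
      have h0 : x + v > t := by
        have := hbefore 0 (by simp) (by omega)
        simpa using this
      have hrec := ih p' (k + 1) (by simpa using Nat.lt_of_succ_lt_succ hp)
        (fun q hq hlt => by
          have := hbefore (q + 1) (by simpa using Nat.succ_lt_succ hq) (by omega)
          simpa using this)
        (by simpa using hat)
      simp only [findlA, if_pos h0, hrec]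
      congr 1
      omega

-- the while-loop runs off the end when nothing fits: IndexError
lemma findlA_none (x t : Int) :
    ∀ (ys : List Int) (k : Nat), (∀ v ∈ ys, x + v > t) → findlA x t ys k = none := by
  intro ys
  induction ys with
  | nil => intro k _; rfl
  | cons v rest ih =>
    intro k hall
    simp only [findlA, if_pos (hall v (by simp)), ih (k + 1) (fun w hw => hall w (by simp [hw]))]

-- removing position (len-1-i) from the reverse = reversing the removal of position i
lemma eraseIdx_reverse (xs : List Int) (i : Nat) (hi : i < xs.length) :
    xs.reverse.eraseIdx (xs.length - 1 - i) = (xs.eraseIdx i).reverse := by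
  have h1 : xs.length - (xs.length - 1 - i) = i + 1 := by omega
  have h2 : xs.length - (xs.length - 1 - i + 1) = i := by omega
  rw [List.eraseIdx_eq_take_drop_succ, List.take_reverse, List.drop_reverse, h1, h2,
    ← List.reverse_append, ← List.eraseIdx_eq_take_drop_succ]

-- one loop iteration of each port, at the same state: both fail, or both pick asc[j-1]
lemma step_eq (lst : List Int) (i : Nat) (asc ab b : List Int) (t : Int)
    (hin : i + 1 < lst.length) (hlen : asc.length = i + 1) (hs : asc.Pairwise (· ≤ ·))
    (hablen : ab.length = lst.length)
    (hlow : ∀ j, j < i + 1 → ab[j]? = lst[j]?) (hat : ab[i + 1]? = some t) :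
    (stepA lst.length i asc.reverse ab b = none ∧ stepB lst i asc t = none)
    ∨ (∃ j, ∃ hj : j < asc.length,
        stepA lst.length i asc.reverse ab b
          = some ((asc.eraseIdx j).reverse, ab.set i (lst.getD i 0 + asc[j]), b ++ [asc[j]])
        ∧ stepB lst i asc t = some (asc[j], asc.eraseIdx j)) := by
  have hiN : i < lst.length := by omega
  have hx : lst.getD i 0 = lst[i] := List.getD_eq_getElem lst 0 hiN
  have hne : ¬ (i = lst.length - 1) := by omega
  have habi : PySem.List.pyGet? ab (i : Int) = some lst[i] := by
    rw [PySem.List.pyGet?_natCast, hlow i (by omega), List.getElem?_eq_getElem hiN]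
  have habi1 : PySem.List.pyGet? ab ((i : Int) + 1) = some t := by
    rw [show ((i : Int) + 1) = (((i + 1 : Nat)) : Int) by push_cast; ring,
      PySem.List.pyGet?_natCast, hat]
  obtain ⟨hjle, hle, hgt⟩ :=
    PySem.List.bisectRight_spec asc (t - lst.getD i 0) hs
  set J := PySem.List.bisectRight asc (t - lst.getD i 0) with hJ
  by_cases hj0 : J = 0
  · -- nothing fits: A's scan runs off the end, B's bisect returns 0
    left
    constructor
    · have hfind : findlA lst[i] t asc.reverse 0 = none := by
        apply findlA_none
        intro v hv
        rw [List.mem_reverse] at hv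
        obtain ⟨q, hq, rfl⟩ := List.mem_iff_getElem.mp hv
        have := hgt q hq (by omega)
        omega
      simp only [stepA, if_neg hne, habi, habi1, hfind]
    · unfold stepB
      rw [← hJ, if_pos hj0]
  · -- asc[J-1] is picked by both
    right
    have hj1 : J - 1 < asc.length := by omega
    refine ⟨J - 1, hj1, ?_, ?_⟩
    · have hrevlen : asc.reverse.length = asc.length := List.length_reverse
      have hplen : asc.length - J < asc.reverse.length := by omega
      have hfind : findlA lst[i] t asc.reverse 0 = some (asc.length - J) := by
        have := findlA_some lst[i] t asc.reverse (asc.length - J) 0 hplen ?_ ?_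
        · simpa using this
        · intro q hq hqlt
          rw [List.getElem_reverse]
          have := hgt (asc.length - 1 - q) (by omega) (by omega)
          omega
        · simp only [List.getElem_reverse,
            show asc.length - 1 - (asc.length - J) = J - 1 from by omega]
          have := hle (J - 1) hj1 (by omega)
          omega
      have hpop : PySem.List.pop? asc.reverse ((asc.length - J : Nat) : Int)
          = some (asc[J - 1], (asc.eraseIdx (J - 1)).reverse) := by
        rw [PySem.List.pop?_natCast asc.reverse (asc.length - J) hplen]
        simp only [List.getElem_reverse,
          show asc.length - 1 - (asc.length - J) = J - 1 from by omega]
        have e2 : asc.reverse.eraseIdx (asc.length - J) = (asc.eraseIdx (J - 1)).reverse := by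
          rw [show asc.length - J = asc.length - 1 - (J - 1) from by omega]
          exact eraseIdx_reverse asc (J - 1) hj1
        simp only [e2]
      simp only [stepA, if_neg hne, habi, habi1, hfind, hpop, hx]
    · unfold stepB
      rw [← hJ, if_neg hj0,
        show (J : Int) - 1 = ((J - 1 : Nat) : Int) by omega,
        PySem.List.pop?_natCast asc (J - 1) hj1]

-- the loop invariant: before processing index i, A's a is the reverse of B's asc,
-- A's ab agrees with lst below i+1 and holds B's threshold t at position i+1
lemma loop_eq (lst : List Int) :
    ∀ (i : Nat) (asc ab out : List Int) (t : Int),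
      i + 1 < lst.length →
      asc.length = i + 1 →
      asc.Pairwise (· ≤ ·) →
      ab.length = lst.length →
      (∀ j, j < i + 1 → ab[j]? = lst[j]?) →
      ab[i + 1]? = some t →
      goA lst.length i asc.reverse ab out = goB lst i asc t out := by
  intro i
  induction i with
  | zero =>
    intro asc ab out t hin hlen hs hablen hlow hat
    rcases step_eq lst 0 asc ab out t hin hlen hs hablen hlow hat with
      ⟨hA, hB⟩ | ⟨j, hj, hA, hB⟩
    · simp [goA, goB, hA, hB]
    · simp [goA, goB, hA, hB]
  | succ i ih =>
    intro asc ab out t hin hlen hs hablen hlow hat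
    rcases step_eq lst (i + 1) asc ab out t hin hlen hs hablen hlow hat with
      ⟨hA, hB⟩ | ⟨j, hj, hA, hB⟩
    · simp only [goA, goB, hA, hB]
    · simp only [goA, goB, hA, hB]
      apply ih
      · omega
      · rw [List.length_eraseIdx, if_pos hj]; omega
      · exact List.Pairwise.sublist (List.eraseIdx_sublist asc j) hs
      · simpa using hablen
      · intro q hq
        rw [List.getElem?_set_ne (by omega)]
        exact hlow q (by omega)
      · exact List.getElem?_set_self (by omega)

-- the two ports agree on every list (inside Pre_ both return the greedy's list,
-- outside it both return [] where the Pythons raise)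
lemma ports_eq (lst : List Int) : solution lst = solution_alt lst := by
  rcases lst with _ | ⟨x, _ | ⟨y, rest⟩⟩
  · rfl
  · -- a single element: A's loop runs once (i = 0 = n-1), B never enters its loop
    have hs1 : PySem.List.sorted [x] (fun v => v) false = [x] :=
      PySem.List.sorted_eq_self_of_pairwise [x] (fun v => v) (by simp)
    have hs1r : PySem.List.sorted [x] (fun v => v) true = [x] :=
      PySem.List.sorted_rev_eq_self_of_pairwise [x] (fun v => v) (by simp)
    have hp1 : PySem.List.pop? [x] (-1) = some (x, []) := PySem.List.pop?_last [] x
    simp only [solution, solution_alt, hs1, hs1r, goA, stepA, List.length_cons,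
      List.length_nil, hp1, Nat.cast_zero] at *
    norm_num [PySem.List.pop?_zero_cons]
  · -- n ≥ 2
    set lst := x :: y :: rest with hlst
    have hn2 : 2 ≤ lst.length := by simp [hlst]
    have hn0 : ¬ (lst.length = 0) := by omega
    have hn1 : ¬ (lst.length = 1) := by omega
    set asc := PySem.List.sorted lst (fun v => v) false with hasc
    have hlenasc : asc.length = lst.length := PySem.List.length_sorted lst _ false
    have hsasc : asc.Pairwise (· ≤ ·) := by
      simpa using PySem.List.sorted_pairwise lst (fun v => v)
    have hascne : asc ≠ [] := by
      intro h; rw [h] at hlenasc; simp at hlenasc; omega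
    set m := asc.getLast hascne with hm
    set init := asc.dropLast with hinit
    have hsplit : init ++ [m] = asc := List.dropLast_append_getLast hascne
    have hrevasc : asc.reverse = m :: init.reverse := by rw [← hsplit]; simp
    have hpopA : PySem.List.pop? asc.reverse 0 = some (m, init.reverse) := by
      rw [hrevasc]; exact PySem.List.pop?_zero_cons _ _
    have hpopB : PySem.List.pop? asc (-1) = some (m, init) := by
      rw [← hsplit]; exact PySem.List.pop?_last _ _
    have hnm1 : lst.length - 1 < lst.length := by omega
    have hgetlast : PySem.List.pyGet? lst (((lst.length - 1 : Nat)) : Int)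
        = some lst[lst.length - 1] := by
      rw [PySem.List.pyGet?_natCast, List.getElem?_eq_getElem hnm1]
    set T := lst[lst.length - 1] + m with hT
    have hgetD : lst.getD (lst.length - 1) 0 + m = T := by
      rw [List.getD_eq_getElem lst 0 hnm1]
    have hstep : stepA lst.length ((lst.length - 2) + 1) asc.reverse lst []
        = some (init.reverse, lst.set (lst.length - 1) T, [m]) := by
      rw [show (lst.length - 2) + 1 = lst.length - 1 from by omega]
      simp only [stepA, hpopA, hgetlast]
      simp [hT]
    have hloop := loop_eq lst (lst.length - 2) init
      (lst.set (lst.length - 1) T) [m] T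
      (by omega)
      (by rw [hinit, List.length_dropLast]; omega)
      (List.Pairwise.sublist (List.dropLast_sublist asc) hsasc)
      (by simp)
      (fun q hq => List.getElem?_set_ne (by omega))
      (by
        rw [show (lst.length - 2) + 1 = lst.length - 1 from by omega]
        exact List.getElem?_set_self hnm1)
    simp only [solution, solution_alt, ← hasc, sortedDesc_eq_reverse_asc, if_neg hn0,
      if_neg hn1, hpopB, hgetD]
    rw [show lst.length - 1 = (lst.length - 2) + 1 from by omega]
    simp only [goA, hstep, hloop]

-- ===== VERDICT (by name: the statement is the Claim_ definition above) =====
theorem solution_spec : Claim_equal_solution := by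
  intro lst _ _
  unfold Spec_solution
  exact ports_eq lst
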